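-- pv_equiv track=rewrite | github.com/artem-dorofeev/homework_py | main_hw4_02.py | prepare_data
-- ===== SOURCE A (Python) =====
-- def prepare_data(data):
--     min = max = data[0]
--     i = 1
--     while i < len(data):
--         if min > data[i]:
--             min = data[i]
--         if max < data[i]:
--             max = data[i]
--         i += 1
--
--     while min in data:
--         data.remove(min)
--
--     while max in data:
--         data.remove(max)
--
--     data.sort()
--
--     return data
-- ===== SOURCE B (Python) =====
-- def prepare_data(data):
--     lo = min(data)
--     hi = max(data)
--     return sorted(x for x in data if x != lo and x != hi)
-- ===== Notes on version B (the rewrite author's own statement) =====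
-- stated objective: faster
-- what changed: Replace the manual min/max scan plus repeated 'while v in data: data.remove(v)' quadratic deletion loops with built-in min/max and a single filtering pass before sorting; B does not mutate the caller's list (the proof is about the return value).
-- outside the precondition, e.g. on prepare_data([]): A raises IndexError, B raises ValueError
import Mathlib
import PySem

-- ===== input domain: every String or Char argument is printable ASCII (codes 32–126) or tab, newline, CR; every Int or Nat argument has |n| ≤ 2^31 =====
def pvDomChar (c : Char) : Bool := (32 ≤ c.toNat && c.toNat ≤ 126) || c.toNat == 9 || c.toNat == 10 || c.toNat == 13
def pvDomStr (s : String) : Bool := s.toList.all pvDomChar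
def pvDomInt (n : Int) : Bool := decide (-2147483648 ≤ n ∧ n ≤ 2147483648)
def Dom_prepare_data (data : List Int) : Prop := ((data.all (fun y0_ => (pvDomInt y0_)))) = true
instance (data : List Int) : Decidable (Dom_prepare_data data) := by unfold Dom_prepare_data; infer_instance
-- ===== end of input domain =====

-- B replaces A's manual min/max scan and repeated remove-while-member loops by built-in
-- min/max and a single filter before sorting (objective: faster). A mutates its argument in
-- place; B does not — the equivalence proved here is about the RETURN value only.

-- ===== PORT A =====
-- 'while v in data: data.remove(v)' — each iteration removes the first occurrence of v.
def pvRemoveAll (v : Int) (xs : List Int) : List Int :=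
  match h : PySem.List.remove? xs v with
  | some ys => pvRemoveAll v ys
  | none => xs
termination_by xs.length
decreasing_by
  have hv : v ∈ xs := by
    by_contra hc
    rw [(PySem.List.remove?_eq_none_iff xs v).mpr hc] at h
    simp at h
  rw [PySem.List.remove?_eq_some_erase xs v hv] at h
  cases h
  exact List.length_erase_of_mem hv ▸ Nat.sub_lt (List.length_pos_of_mem hv) one_pos

def prepare_data (data : List Int) : List Int :=
  match data with
  | [] => []   -- unreachable under Pre_: Python raises IndexError on data[0]
  | d :: t =>
    -- the while-i loop tracking (min, max) over data[1:]
    let mm := t.foldl (fun p x => (if p.1 > x then x else p.1, if p.2 < x then x else p.2)) (d, d)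
    let r1 := pvRemoveAll mm.1 data
    let r2 := pvRemoveAll mm.2 r1
    PySem.List.sorted r2 (fun x => x) false

-- ===== PORT B =====
def prepare_data_alt (data : List Int) : List Int :=
  match PySem.List.min? data (fun x => x), PySem.List.max? data (fun x => x) with
  | some lo, some hi =>
      PySem.List.sorted (data.filter (fun x => x != lo && x != hi)) (fun x => x) false
  | _, _ => []   -- unreachable under Pre_: Python's min([]) raises ValueError

-- ===== PRECONDITION & SPEC =====
-- A raises IndexError on the empty list (data[0]); B raises ValueError there (min([])).
def Pre_prepare_data (data : List Int) : Prop := data ≠ []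
instance (data : List Int) : Decidable (Pre_prepare_data data) := by
  unfold Pre_prepare_data; infer_instance
def pvWitness_prepare_data : List Int := [3, 1, 2]

def Spec_prepare_data (data : List Int) (out : List Int) : Prop := out = prepare_data_alt data
instance (data : List Int) (out : List Int) : Decidable (Spec_prepare_data data out) := by
  unfold Spec_prepare_data; infer_instance

-- ===== CLAIM (what is proved, stated in full; the proofs are below) =====
def Claim_equal_prepare_data : Prop := ∀ (data : List Int), Dom_prepare_data data → Pre_prepare_data data → Spec_prepare_data data (prepare_data data)

-- ===== LEMMAS AND PROOFS =====

lemma filter_erase_ne (v : Int) (xs : List Int) :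
    (xs.erase v).filter (fun x => x != v) = xs.filter (fun x => x != v) := by
  induction xs with
  | nil => rfl
  | cons x t ih =>
    by_cases hx : x = v
    · subst hx; simp [List.erase_cons_head]
    · rw [List.erase_cons_tail (by simpa using hx)]
      simp [hx, ih]

lemma pvRemoveAll_eq_filter (v : Int) (xs : List Int) :
    pvRemoveAll v xs = xs.filter (fun x => x != v) := by
  rw [pvRemoveAll]
  by_cases hv : v ∈ xs
  · rw [PySem.List.remove?_eq_some_erase xs v hv]
    have := pvRemoveAll_eq_filter v (xs.erase v)
    simp only [this, filter_erase_ne]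
  · rw [(PySem.List.remove?_eq_none_iff xs v).mpr hv]
    exact (List.filter_eq_self.mpr (fun a ha => by
      simp only [bne_iff_ne, ne_eq]
      exact fun h => hv (h ▸ ha))).symm
termination_by xs.length
decreasing_by
  exact List.length_erase_of_mem hv ▸ Nat.sub_lt (List.length_pos_of_mem hv) one_pos

lemma mm_fold (t : List Int) (a b : Int) :
    t.foldl (fun p x => (if p.1 > x then x else p.1, if p.2 < x then x else p.2)) (a, b)
      = (t.foldl min a, t.foldl max b) := by
  induction t generalizing a b with
  | nil => rfl
  | cons x t ih =>
    simp only [List.foldl_cons, ih]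
    congr 1 <;> congr 1 <;> simp [min_def, max_def] <;> split_ifs <;> omega

theorem prepare_data_spec : Claim_equal_prepare_data := by
  intro data _ hpre
  unfold Spec_prepare_data prepare_data prepare_data_alt
  match data with
  | [] => exact absurd rfl hpre
  | d :: t =>
    simp only [mm_fold, PySem.List.min?_id_cons, PySem.List.max?_id_cons]
    rw [pvRemoveAll_eq_filter, pvRemoveAll_eq_filter, List.filter_filter]
    congr 1
    exact List.filter_congr (fun a _ => Bool.and_comm _ _)
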